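-- pv_equiv track=rewrite | github.com/mikelong22/lex-syn-analyzer | main.py | declarations
-- ===== SOURCE A (Python) =====
-- def declarations(list,current,state=0):
--     if not (list[current][2] == 'bool' or list[current][2] == 'int'):
--         return [state, current]
--     else:
--         current += 1
--         if list[current][3] != 'ID':
--             return [state, current-1]
--         else:
--             current += 1
--             if list[current][2] != ';':
--                 return [state, current-1]
--             else:
--                 current += 1
--                 return declarations(list, current, 1)
-- ===== SOURCE B (Python) =====
-- def declarations(list, current, state=0):
--     # One flat scan: advance by whole declarations while the 3-token pattern
--     # (type, ID, ';') matches, then classify the single failing position.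
--     c = current
--     while (list[c][2] == 'bool' or list[c][2] == 'int') and list[c + 1][3] == 'ID' and list[c + 2][2] == ';':
--         c += 3
--     st = 1 if c > current else state
--     if not (list[c][2] == 'bool' or list[c][2] == 'int'):
--         return [st, c]
--     if list[c + 1][3] != 'ID':
--         return [st, c]
--     return [st, c + 1]
-- ===== Notes on version B (the rewrite author's own statement) =====
-- stated objective: alternative
-- what changed: A's nested-if recursion (one recursive call per declaration) is replaced by a single flat while-scan that advances three tokens at a time while a whole (type, ID, ';') declaration matches, followed by a post-loop classification of the one failing position; state is set once from whether the scan moved.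
import Mathlib
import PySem

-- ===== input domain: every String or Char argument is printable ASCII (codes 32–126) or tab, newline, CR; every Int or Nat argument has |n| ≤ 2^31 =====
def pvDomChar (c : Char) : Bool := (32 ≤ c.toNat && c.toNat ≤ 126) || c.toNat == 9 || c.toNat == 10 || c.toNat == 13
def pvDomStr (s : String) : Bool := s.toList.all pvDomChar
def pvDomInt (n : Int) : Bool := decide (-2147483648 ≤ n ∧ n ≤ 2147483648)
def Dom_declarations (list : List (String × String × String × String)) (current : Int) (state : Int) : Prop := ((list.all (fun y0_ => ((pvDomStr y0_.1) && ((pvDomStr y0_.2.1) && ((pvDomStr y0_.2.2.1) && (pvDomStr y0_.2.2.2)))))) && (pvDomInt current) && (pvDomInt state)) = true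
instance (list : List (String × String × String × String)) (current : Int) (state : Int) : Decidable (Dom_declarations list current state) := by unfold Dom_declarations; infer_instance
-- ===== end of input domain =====

-- B replaces A's nested-if recursion by one flat while-scan over whole declarations
-- followed by a classification of the single failing position (objective: alternative decomposition).

-- ===== PORT A =====
-- literal transliteration of A; where Python raises IndexError (pyGet? = none) the port
-- returns [] — exactly those inputs are excluded by Pre_declarations.  The Nat fuel is
-- only a totality guard: list.length + 1 steps always suffice (each recursive call
-- consumes three in-range tokens), so the fuel-0 branch is never reached where Python returns.
def declarationsFuel (list : List (String × String × String × String)) : Nat → Int → Int → List Int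
  | 0, _, _ => []
  | (fuel + 1), current, state =>
    match PySem.List.pyGet? list current with
    | none => []
    | some t =>
      if ¬(t.2.2.1 = "bool" ∨ t.2.2.1 = "int") then [state, current]
      else
        match PySem.List.pyGet? list (current + 1) with
        | none => []
        | some t2 =>
          if t2.2.2.2 ≠ "ID" then [state, (current + 1) - 1]
          else
            match PySem.List.pyGet? list (current + 2) with
            | none => []
            | some t3 =>
              if t3.2.2.1 ≠ ";" then [state, (current + 2) - 1]
              else declarationsFuel list fuel (current + 3) 1

def declarations (list : List (String × String × String × String)) (current : Int) (state : Int) : List Int :=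
  declarationsFuel list (list.length + 1) current state

-- ===== PORT B =====
-- the while-condition of Source B, with Python's short-circuit order of the three accesses
def declCond (list : List (String × String × String × String)) (c : Int) : Bool :=
  match PySem.List.pyGet? list c with
  | none => false
  | some t =>
    ((t.2.2.1 == "bool") || (t.2.2.1 == "int")) &&
      (match PySem.List.pyGet? list (c + 1) with
       | none => false
       | some t2 =>
         (t2.2.2.2 == "ID") &&
           (match PySem.List.pyGet? list (c + 2) with
            | none => false
            | some t3 => t3.2.2.1 == ";"))

-- the while loop of Source B: advance c by 3 while a whole declaration matches
-- (the Nat fuel is only a totality guard, as in port A)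
def declScanFuel (list : List (String × String × String × String)) : Nat → Int → Int
  | 0, c => c
  | (fuel + 1), c => if declCond list c then declScanFuel list fuel (c + 3) else c

def declScan (list : List (String × String × String × String)) (c : Int) : Int :=
  declScanFuel list (list.length + 1) c

-- the post-loop classification of Source B (same pyGet? = none convention as port A)
def declClassify (list : List (String × String × String × String)) (c : Int) (st : Int) : List Int :=
  match PySem.List.pyGet? list c with
  | none => []
  | some t =>
    if ¬(t.2.2.1 = "bool" ∨ t.2.2.1 = "int") then [st, c]
    else
      match PySem.List.pyGet? list (c + 1) with
      | none => []
      | some t2 =>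
        if t2.2.2.2 ≠ "ID" then [st, c]
        else [st, c + 1]

def declarations_alt (list : List (String × String × String × String)) (current : Int) (state : Int) : List Int :=
  let c := declScan list current
  let st : Int := if c > current then 1 else state
  declClassify list c st

-- ===== PRECONDITION & SPEC =====
-- the third/fourth fields of token i (Python negative-index rule, default for out of range)
def pvFld2 (list : List (String × String × String × String)) (i : Int) : String :=
  (PySem.List.pyGetD list i ("", "", "", "")).2.2.1
def pvFld3 (list : List (String × String × String × String)) (i : Int) : String :=
  (PySem.List.pyGetD list i ("", "", "", "")).2.2.2

-- token i is a type keyword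
def pvTy (list : List (String × String × String × String)) (i : Int) : Bool :=
  pvFld2 list i == "bool" || pvFld2 list i == "int"

-- index i is in Python range for the token list
def pvInR (list : List (String × String × String × String)) (i : Int) : Bool :=
  decide (PySem.Raise.InRange list.length i)

-- a whole declaration (type, ID, ';') sits at positions c, c+1, c+2, all in range
def pvFullDecl (list : List (String × String × String × String)) (c : Int) : Bool :=
  pvInR list c && pvInR list (c + 1) && pvInR list (c + 2) &&
  pvTy list c && (pvFld3 list (c + 1) == "ID") && (pvFld2 list (c + 2) == ";")

-- position c makes A's next token access raise IndexError
def pvFailAt (list : List (String × String × String × String)) (c : Int) : Bool :=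
  (!pvInR list c) ||
  (pvTy list c && !pvInR list (c + 1)) ||
  (pvTy list c && (pvFld3 list (c + 1) == "ID") && !pvInR list (c + 2))

-- Pre_ excludes exactly the inputs on which A raises IndexError: those where, after some
-- number k of whole declarations from `current`, the next token access is out of range.
def Pre_declarations (list : List (String × String × String × String)) (current : Int) (state : Int) : Prop :=
  ∀ k : Nat, k ≤ list.length + 1 →
    (∀ i : Nat, i < k → pvFullDecl list (current + 3 * i) = true) →
    pvFailAt list (current + 3 * k) = false
instance (list : List (String × String × String × String)) (current : Int) (state : Int) : Decidable (Pre_declarations list current state) := by unfold Pre_declarations; infer_instance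

def pvWitness_declarations : (List (String × String × String × String)) × Int × Int :=
  ([("int", "3", "int", "TYPE"), ("x", "4", "x", "ID"), (";", "5", ";", "SYM"), ("y", "6", "y", "ID")], 0, 0)

def Spec_declarations (list : List (String × String × String × String)) (current : Int) (state : Int) (out : List Int) : Prop := out = declarations_alt list current state
instance (list : List (String × String × String × String)) (current : Int) (state : Int) (out : List Int) : Decidable (Spec_declarations list current state out) := by unfold Spec_declarations; infer_instance

-- ===== CLAIM (what is proved, stated in full; the proofs are below) =====
def Claim_equal_declarations : Prop := ∀ (list : List (String × String × String × String)) (current : Int) (state : Int), Dom_declarations list current state → Pre_declarations list current state → Spec_declarations list current state (declarations list current state)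

-- ===== LEMMAS AND PROOFS =====

theorem pyGetD_of_some {α : Type} {xs : List α} {i : Int} {x : α} (d : α)
    (h : PySem.List.pyGet? xs i = some x) : PySem.List.pyGetD xs i d = x := by
  simp [PySem.List.pyGetD, h]

theorem inRange_of_some {α : Type} {xs : List α} {i : Int} {x : α}
    (h : PySem.List.pyGet? xs i = some x) : PySem.Raise.InRange xs.length i := by
  by_contra hc
  rw [← PySem.List.pyGet?_eq_none_iff] at hc
  rw [hc] at h; cases h

theorem declScanFuel_ge (list : List (String × String × String × String)) :
    ∀ (f : Nat) (c : Int), c ≤ declScanFuel list f c := by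
  intro f
  induction f with
  | zero => intro c; simp [declScanFuel]
  | succ f ihf =>
    intro c
    simp only [declScanFuel]
    split
    · have := ihf (c + 3); omega
    · omega

theorem declCond_inRange {list : List (String × String × String × String)} {c : Int}
    (h : declCond list c = true) : PySem.Raise.InRange list.length (c + 2) := by
  unfold declCond at h
  cases hg : PySem.List.pyGet? list c with
  | none => rw [hg] at h; simp at h
  | some t =>
    rw [hg] at h
    simp only [Bool.and_eq_true] at h
    cases hg2 : PySem.List.pyGet? list (c + 1) with
    | none => rw [hg2] at h; simp at h
    | some t2 =>
      rw [hg2] at h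
      simp only [Bool.and_eq_true] at h
      cases hg3 : PySem.List.pyGet? list (c + 2) with
      | none => rw [hg3] at h; simp at h
      | some t3 => exact inRange_of_some hg3

theorem declScanFuel_congr (list : List (String × String × String × String)) :
    ∀ (f1 : Nat), ∀ (f2 : Nat) (c : Int),
      2 * (list.length : Int) + 3 - c ≤ 3 * (f1 : Int) →
      2 * (list.length : Int) + 3 - c ≤ 3 * (f2 : Int) →
      declScanFuel list f1 c = declScanFuel list f2 c := by
  intro f1
  induction f1 with
  | zero =>
    intro f2 c h1 h2
    cases f2 with
    | zero => rfl
    | succ g =>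
      simp only [declScanFuel]
      by_cases hc : declCond list c = true
      · exfalso
        rcases declCond_inRange hc with ⟨hlo, hhi⟩
        simp only [Nat.cast_zero] at h1
        omega
      · simp [hc]
  | succ f ihf =>
    intro f2 c h1 h2
    cases f2 with
    | zero =>
      simp only [declScanFuel]
      by_cases hc : declCond list c = true
      · exfalso
        rcases declCond_inRange hc with ⟨hlo, hhi⟩
        simp only [Nat.cast_zero] at h2
        omega
      · simp [hc]
    | succ g =>
      simp only [declScanFuel]
      by_cases hc : declCond list c = true
      · rcases declCond_inRange hc with ⟨hlo, hhi⟩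
        simp only [hc, if_pos]
        apply ihf g (c + 3) <;> push_cast <;> push_cast at h1 h2 <;> omega
      · simp [hc]

-- unpacking pvFailAt … = false into the three in-range facts
theorem failAt_elim {list : List (String × String × String × String)} {c : Int}
    (h : pvFailAt list c = false) :
    PySem.Raise.InRange list.length c ∧
    (pvTy list c = true → PySem.Raise.InRange list.length (c + 1)) ∧
    (pvTy list c = true → pvFld3 list (c + 1) = "ID" →
      PySem.Raise.InRange list.length (c + 2)) := by
  refine ⟨?_, ?_, ?_⟩
  · by_contra hc
    have h0 : pvInR list c = false := by simp [pvInR, hc]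
    simp [pvFailAt, h0] at h
  · intro hty
    by_contra hc
    have h1 : pvInR list (c + 1) = false := by simp [pvInR, hc]
    simp [pvFailAt, hty, h1] at h
  · intro hty hid
    by_contra hc
    have h2 : pvInR list (c + 2) = false := by simp [pvInR, hc]
    simp [pvFailAt, hty, hid, h2] at h

-- unpacking pvFullDecl … = true
theorem fullDecl_elim {list : List (String × String × String × String)} {c : Int}
    (h : pvFullDecl list c = true) :
    PySem.Raise.InRange list.length c ∧ PySem.Raise.InRange list.length (c + 2) := by
  simp only [pvFullDecl, Bool.and_eq_true, pvInR, decide_eq_true_eq] at h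
  exact ⟨h.1.1.1.1.1, h.1.1.1.2⟩

-- with k = 0 the precondition says the very first access does not fail
theorem pre_notFail {list : List (String × String × String × String)} {c s : Int}
    (hp : Pre_declarations list c s) : pvFailAt list c = false := by
  have := hp 0 (by omega) (by intro i hi; omega)
  simpa using this

-- a whole declaration at c lets Pre shift by one declaration (state becomes 1)
theorem pre_step {list : List (String × String × String × String)} {c s : Int}
    (hp : Pre_declarations list c s) (hfd : pvFullDecl list c = true) :
    Pre_declarations list (c + 3) 1 := by
  intro k hk hall
  have hk' : k ≤ list.length := by
    by_contra hkk
    have hkeq : k = list.length + 1 := by omega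
    -- fullDecl at c and at (c+3)+3·list.length are contradictory in-range demands
    have h0 := (fullDecl_elim hfd).1
    have hL := (fullDecl_elim (hall list.length (by omega))).1
    rcases h0 with ⟨h0a, h0b⟩
    rcases hL with ⟨hra, hrb⟩
    push_cast at hrb
    omega
  have := hp (k + 1) (by omega) ?_
  · have harith : c + 3 * ((k : Int) + 1) = (c + 3) + 3 * k := by ring
    push_cast at this ⊢
    rw [harith] at this
    exact this
  · intro i hi
    cases i with
    | zero => simpa using hfd
    | succ j =>
      have := hall j (by omega)
      have harith : c + 3 * ((j : Int) + 1) = (c + 3) + 3 * j := by ring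
      push_cast
      rw [harith]
      push_cast at this
      exact this

theorem declarations_eq_alt (list : List (String × String × String × String)) :
    ∀ (f : Nat) (c s : Int), 2 * (list.length : Int) + 3 - c ≤ 3 * (f : Int) →
      Pre_declarations list c s → declarationsFuel list f c s = declarations_alt list c s := by
  intro f
  induction f with
  | zero =>
    intro c s hf hpre
    exfalso
    obtain ⟨⟨hl, hu⟩, -, -⟩ := failAt_elim (pre_notFail hpre)
    simp only [Nat.cast_zero] at hf
    omega
  | succ f ihf =>
    intro c s hf hpre
    obtain ⟨hIn0, hnf2, hnf3⟩ := failAt_elim (pre_notFail hpre)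
    -- the first access is in range
    cases hg1 : PySem.List.pyGet? list c with
    | none =>
      rw [PySem.List.pyGet?_eq_none_iff] at hg1
      exact absurd hIn0 hg1
    | some t =>
      have ht' := pyGetD_of_some (("", "", "", "") : String × String × String × String) hg1
      by_cases hty : t.2.2.1 = "bool" ∨ t.2.2.1 = "int"
      · have htyB : pvTy list c = true := by
          simp only [pvTy, pvFld2, ht', Bool.or_eq_true, beq_iff_eq]
          exact hty
        have hIn1 := hnf2 htyB
        cases hg2 : PySem.List.pyGet? list (c + 1) with
        | none =>
          rw [PySem.List.pyGet?_eq_none_iff] at hg2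
          exact absurd hIn1 hg2
        | some t2 =>
          have ht2' := pyGetD_of_some (("", "", "", "") : String × String × String × String) hg2
          by_cases hid : t2.2.2.2 = "ID"
          · have hidF : pvFld3 list (c + 1) = "ID" := by rw [pvFld3, ht2']; exact hid
            have hIn2 := hnf3 htyB hidF
            cases hg3 : PySem.List.pyGet? list (c + 2) with
            | none =>
              rw [PySem.List.pyGet?_eq_none_iff] at hg3
              exact absurd hIn2 hg3
            | some t3 =>
              have ht3' := pyGetD_of_some (("", "", "", "") : String × String × String × String) hg3
              by_cases hsemi : t3.2.2.1 = ";"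
              · -- full declaration: A recurses at c + 3 with state 1; B's scan advances
                have hfd : pvFullDecl list c = true := by
                  simp only [pvFullDecl, Bool.and_eq_true, pvInR, decide_eq_true_eq, beq_iff_eq]
                  exact ⟨⟨⟨⟨⟨hIn0, hIn1⟩, hIn2⟩, htyB⟩, hidF⟩, by rw [pvFld2, ht3']; exact hsemi⟩
                have hpre' := pre_step hpre hfd
                have hcond : declCond list c = true := by
                  unfold declCond
                  rw [hg1, hg2, hg3]
                  rcases hty with h | h <;> simp [h, hid, hsemi]
                have hstep : declarationsFuel list (f + 1) c s = declarationsFuel list f (c + 3) 1 := by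
                  simp [declarationsFuel, hg1, hg2, hg3, hty, hid, hsemi]
                have hIH := ihf (c + 3) 1 (by push_cast at hf ⊢; omega) hpre'
                rw [hstep, hIH]
                have hscan : declScan list c = declScan list (c + 3) := by
                  unfold declScan
                  conv_lhs => rw [declScanFuel]
                  simp only [hcond, if_true]
                  rcases hIn0 with ⟨hlo, hhi⟩
                  exact declScanFuel_congr list list.length (list.length + 1) (c + 3)
                    (by push_cast; omega) (by push_cast; omega)
                have hge := declScanFuel_ge list (list.length + 1) (c + 3)
                unfold declarations_alt
                rw [hscan]
                have h1 : declScan list (c + 3) > c := by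
                  unfold declScan; omega
                simp only [declScan] at h1 ⊢
                simp [h1]
              · -- ';' missing: both return [s, c + 1]
                have hcond : declCond list c = false := by
                  unfold declCond
                  rw [hg1, hg2, hg3]
                  simp [hsemi]
                have hscan : declScan list c = c := by
                  unfold declScan
                  simp [declScanFuel, hcond]
                simp [declarationsFuel, declarations_alt, hscan, declClassify,
                      hg1, hg2, hg3, hty, hid, hsemi]
                omega
          · -- ID missing: both return [s, c]
            have hcond : declCond list c = false := by
              unfold declCond
              rw [hg1, hg2]
              simp [hid]
            have hscan : declScan list c = c := by
              unfold declScan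
              simp [declScanFuel, hcond]
            simp [declarationsFuel, declarations_alt, hscan, declClassify,
                  hg1, hg2, hty, hid]
      · -- not a type token: both return [s, c]
        have hcond : declCond list c = false := by
          unfold declCond
          rw [hg1]
          push_neg at hty
          simp [hty.1, hty.2]
        have hscan : declScan list c = c := by
          unfold declScan
          simp [declScanFuel, hcond]
        simp [declarationsFuel, declarations_alt, hscan, declClassify, hg1, hty]

-- ===== VERDICT (by name: the statement is the Claim_ definition above) =====
theorem declarations_spec : Claim_equal_declarations := by
  intro list current state _ hpre
  unfold Spec_declarations
  obtain ⟨⟨hl, hu⟩, -, -⟩ := failAt_elim (pre_notFail hpre)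
  unfold declarations
  apply declarations_eq_alt list (list.length + 1) current state _ hpre
  push_cast
  omega
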